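-- pv_equiv track=rewrite | github.com/davidmayo/turbo-encoder | src/turbo/__init__.py | _component_encode
-- ===== SOURCE A (Python) =====
-- _TERMINATION_BITS = 4
--
-- def _component_encode(
--     information_bits: list[int],
--     forward_vectors: dict[str, tuple[int, int, int, int, int]],
-- ) -> tuple[list[int], dict[str, list[int]]]:
--     m1 = m2 = m3 = m4 = 0
--     systematic: list[int] = []
--     parity = {name: [] for name in forward_vectors}
--
--     for idx in range(len(information_bits) + _TERMINATION_BITS):
--         feedback = m3 ^ m4  # G0=10011
--         switch_value = (
--             information_bits[idx] if idx < len(information_bits) else feedback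
--         )
--         recursive_input = switch_value ^ feedback
--
--         systematic.append(switch_value)
--         taps = (recursive_input, m1, m2, m3, m4)
--
--         for name, vector in forward_vectors.items():
--             value = 0
--             for include, tap in zip(vector, taps):
--                 if include:
--                     value ^= tap
--             parity[name].append(value)
--
--         m1, m2, m3, m4 = recursive_input, m1, m2, m3
--
--     return systematic, parity
-- ===== SOURCE B (Python) =====
-- _TERMINATION_BITS = 4
--
--
-- def _component_encode(
--     information_bits: list[int],
--     forward_vectors: dict[str, tuple[int, int, int, int, int]],
-- ) -> tuple[list[int], dict[str, list[int]]]: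
--     # Phase 1: run the shift register (kept as a 4-element list) once,
--     # recording the systematic stream and the 5-tap row of every step.
--     n = len(information_bits)
--     reg = [0, 0, 0, 0]
--     systematic: list[int] = []
--     rows: list[list[int]] = []
--     for idx in range(n + _TERMINATION_BITS):
--         feedback = reg[2] ^ reg[3]
--         switch_value = information_bits[idx] if idx < n else feedback
--         r = switch_value ^ feedback
--         systematic.append(switch_value)
--         rows.append([r] + reg)
--         reg = [r] + reg[:3]
--     # Phase 2: one pass per forward vector over the recorded rows, using the
--     # vector's active tap positions computed once.
--     parity: dict[str, list[int]] = {}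
--     for name, vector in forward_vectors.items():
--         idxs = [i for i, include in enumerate(vector) if include]
--         parity[name] = [_xor_taps(row, idxs) for row in rows]
--     return systematic, parity
--
--
-- def _xor_taps(row: list[int], idxs: list[int]) -> int:
--     value = 0
--     for i in idxs:
--         value ^= row[i]
--     return value
-- ===== Notes on version B (the rewrite author's own statement) =====
-- stated objective: alternative
-- what changed: B transposes the computation into two phases: one pass records the systematic stream and every step's 5-tap row with the register kept as a list, then each forward vector is processed in its own pass over the recorded rows using its active tap positions precomputed once, instead of A's per-step inner loop over all vectors zipping each full vector with the taps.
import Mathlib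
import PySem

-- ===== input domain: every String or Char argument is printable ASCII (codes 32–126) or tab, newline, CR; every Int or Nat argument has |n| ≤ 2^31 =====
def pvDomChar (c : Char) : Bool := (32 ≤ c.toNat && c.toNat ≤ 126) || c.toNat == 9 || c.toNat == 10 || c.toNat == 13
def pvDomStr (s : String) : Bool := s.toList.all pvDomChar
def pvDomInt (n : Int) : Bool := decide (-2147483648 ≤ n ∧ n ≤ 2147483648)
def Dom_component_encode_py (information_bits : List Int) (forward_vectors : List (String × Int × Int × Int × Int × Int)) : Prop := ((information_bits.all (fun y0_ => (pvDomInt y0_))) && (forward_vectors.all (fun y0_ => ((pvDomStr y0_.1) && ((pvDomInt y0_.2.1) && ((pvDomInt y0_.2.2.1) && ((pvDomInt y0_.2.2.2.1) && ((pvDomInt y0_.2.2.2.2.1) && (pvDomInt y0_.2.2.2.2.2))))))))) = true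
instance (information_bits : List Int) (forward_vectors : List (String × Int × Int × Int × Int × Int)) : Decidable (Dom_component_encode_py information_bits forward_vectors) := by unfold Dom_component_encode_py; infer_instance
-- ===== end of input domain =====

-- B re-implements the encoder in two transposed phases (record the tap rows once, then one
-- pass per forward vector over its precomputed active tap positions); objective: alternative.

-- ===== PORT A =====
-- inner 'for include, tap in zip(vector, taps): if include: value ^= tap'
def pvInnerA (vector : Int × Int × Int × Int × Int) (taps : List Int) : Int :=
  (([vector.1, vector.2.1, vector.2.2.1, vector.2.2.2.1, vector.2.2.2.2]).zip taps).foldl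
    (fun value it => if it.1 ≠ 0 then PySem.Int.bxor value it.2 else value) 0

-- one iteration of A's 'for idx in range(len(information_bits) + _TERMINATION_BITS)' loop
def pvStepA (information_bits : List Int) (n : Int) (forward_vectors : List (String × Int × Int × Int × Int × Int))
    (st : (Int × Int × Int × Int) × List Int × PySem.Dict String (List Int)) (idx : Int) :
    (Int × Int × Int × Int) × List Int × PySem.Dict String (List Int) :=
  let feedback := PySem.Int.bxor st.1.2.2.1 st.1.2.2.2
  let switch_value := if idx < n then PySem.List.pyGetD information_bits idx 0 else feedback
  let recursive_input := PySem.Int.bxor switch_value feedback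
  let taps := [recursive_input, st.1.1, st.1.2.1, st.1.2.2.1, st.1.2.2.2]
  let parity := forward_vectors.foldl
      (fun parity p => parity.modify p.1 [] (fun l => l ++ [pvInnerA p.2 taps])) st.2.2
  ((recursive_input, st.1.1, st.1.2.1, st.1.2.2.1), st.2.1 ++ [switch_value], parity)

def component_encode_py (information_bits : List Int) (forward_vectors : List (String × Int × Int × Int × Int × Int)) : List Int × (List (String × List Int)) :=
  let parity0 : PySem.Dict String (List Int) :=
    forward_vectors.foldl (fun d p => d.insert p.1 ([] : List Int)) PySem.Dict.empty
  let n : Int := information_bits.length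
  let res := (PySem.List.pyRange 0 (n + 4) 1).foldl
      (pvStepA information_bits n forward_vectors) ((0, 0, 0, 0), [], parity0)
  (res.2.1, res.2.2.items)

-- ===== PORT B =====
-- '[i for i, include in enumerate(vector) if include]'
def pvTapIdxs (vector : Int × Int × Int × Int × Int) : List Nat :=
  ([vector.1, vector.2.1, vector.2.2.1, vector.2.2.2.1, vector.2.2.2.2].zipIdx).filterMap
    (fun q => if q.1 ≠ 0 then some q.2 else none)

-- helper '_xor_taps'
def pvXorTaps (row : List Int) (idxs : List Nat) : Int :=
  idxs.foldl (fun value i => PySem.Int.bxor value (row.getD i 0)) 0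

-- one iteration of B's phase-1 loop (state: register list, systematic, recorded rows)
def pvStepB (information_bits : List Int) (n : Nat)
    (st : List Int × List Int × List (List Int)) (idx : Nat) : List Int × List Int × List (List Int) :=
  let feedback := PySem.Int.bxor (st.1.getD 2 0) (st.1.getD 3 0)
  let switch_value := if idx < n then information_bits.getD idx 0 else feedback
  let r := PySem.Int.bxor switch_value feedback
  (r :: st.1.take 3, st.2.1 ++ [switch_value], st.2.2 ++ [r :: st.1])

def component_encode_py_alt (information_bits : List Int) (forward_vectors : List (String × Int × Int × Int × Int × Int)) : List Int × (List (String × List Int)) :=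
  let n := information_bits.length
  let res := (List.range (n + 4)).foldl (pvStepB information_bits n) ([0, 0, 0, 0], [], [])
  (res.2.1, forward_vectors.map (fun p =>
    (p.1, res.2.2.map (fun row => pvXorTaps row (pvTapIdxs p.2)))))

-- ===== PRECONDITION & SPEC =====
-- Pre_ excludes association lists whose names repeat: such a list is not a distinct Python
-- input at all (a Python dict collapses duplicate keys before A ever sees them), so no
-- behaviour is specified there.
def Pre_component_encode_py (information_bits : List Int) (forward_vectors : List (String × Int × Int × Int × Int × Int)) : Prop :=
  (forward_vectors.map Prod.fst).Nodup
instance (information_bits : List Int) (forward_vectors : List (String × Int × Int × Int × Int × Int)) : Decidable (Pre_component_encode_py information_bits forward_vectors) := by unfold Pre_component_encode_py; infer_instance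

def pvWitness_component_encode_py : List Int × (List (String × Int × Int × Int × Int × Int)) :=
  ([1, 0, 1], [("a", 1, 1, 0, 1, 1), ("b", 1, 0, 0, 0, 1)])

def Spec_component_encode_py (information_bits : List Int) (forward_vectors : List (String × Int × Int × Int × Int × Int)) (out : List Int × (List (String × List Int))) : Prop := out = component_encode_py_alt information_bits forward_vectors
instance (information_bits : List Int) (forward_vectors : List (String × Int × Int × Int × Int × Int)) (out : List Int × (List (String × List Int))) : Decidable (Spec_component_encode_py information_bits forward_vectors out) := by unfold Spec_component_encode_py; infer_instance

-- ===== CLAIM (what is proved, stated in full; the proofs are below) =====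
def Claim_equal_component_encode_py : Prop := ∀ (information_bits : List Int) (forward_vectors : List (String × Int × Int × Int × Int × Int)), Dom_component_encode_py information_bits forward_vectors → Pre_component_encode_py information_bits forward_vectors → Spec_component_encode_py information_bits forward_vectors (component_encode_py information_bits forward_vectors)

-- ===== LEMMAS AND PROOFS =====

-- the two inner parity computations agree on a 5-element row
theorem pvInner_eq (v : Int × Int × Int × Int × Int) (t0 t1 t2 t3 t4 : Int) :
    pvInnerA v [t0, t1, t2, t3, t4] = pvXorTaps [t0, t1, t2, t3, t4] (pvTapIdxs v) := by
  obtain ⟨v1, v2, v3, v4, v5⟩ := v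
  by_cases h1 : v1 = 0 <;> by_cases h2 : v2 = 0 <;> by_cases h3 : v3 = 0 <;>
    by_cases h4 : v4 = 0 <;> by_cases h5 : v5 = 0 <;>
    simp [pvInnerA, pvXorTaps, pvTapIdxs, h1, h2, h3, h4, h5]

theorem pv_filter_singleton {α : Type} (fv : List (String × α)) (p : String × α)
    (hn : (fv.map Prod.fst).Nodup) (hp : p ∈ fv) :
    fv.filter (fun q => q.1 == p.1) = [p] := by
  induction fv with
  | nil => cases hp
  | cons a l ih =>
    simp only [List.map_cons, List.nodup_cons] at hn
    rcases List.mem_cons.mp hp with hp | hp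
    · subst hp
      have hl : l.filter (fun q => q.1 == p.1) = [] := by
        rw [List.filter_eq_nil_iff]
        intro q hq
        simp only [beq_iff_eq]
        intro hq1
        exact hn.1 (hq1 ▸ List.mem_map_of_mem hq)
      simp [hl]
    · have hne : ¬(a.1 == p.1) = true := by
        simp only [beq_iff_eq]
        intro h
        exact hn.1 (h ▸ List.mem_map_of_mem hp)
      simp only [List.filter_cons, hne]
      simpa using ih hn.2 hp

-- parity0: every entry of the initial dict is []
theorem pv_parity0_getD (fv : List (String × Int × Int × Int × Int × Int))
    (d : PySem.Dict String (List Int)) (h : ∀ k, d.getD k [] = ([] : List Int)) (k : String) :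
    ((fv.foldl (fun d p => d.insert p.1 ([] : List Int)) d).getD k []) = ([] : List Int) := by
  induction fv generalizing d with
  | nil => exact h k
  | cons a l ih =>
    simp only [List.foldl_cons]
    refine ih _ (fun k' => ?_)
    rw [PySem.Dict.getD_insert]
    split <;> simp [h]

-- keys of a Set.update when everything updated is already there
theorem pv_set_update_self (s : PySem.Set String) (xs : List String) (h : ∀ x ∈ xs, x ∈ s) :
    PySem.Set.update s xs = s := by
  rw [PySem.Set.update_eq_append_filter]
  simp
  exact h

-- one A-step's inner dict fold, characterised
theorem pv_innerfold_getD (fv : List (String × Int × Int × Int × Int × Int))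
    (taps : List Int) (d : PySem.Dict String (List Int)) (c : String) :
    ((fv.foldl (fun parity p => parity.modify p.1 [] (fun l => l ++ [pvInnerA p.2 taps])) d).getD c [])
      = d.getD c [] ++ ((fv.filter (fun q => q.1 == c)).map (fun p => pvInnerA p.2 taps)) := by
  have h := PySem.Dict.getD_foldl_modify_append
    (l := fv.map (fun p => (p.1, pvInnerA p.2 taps))) (d := d) (c := c)
  rw [List.foldl_map] at h
  rw [h, List.filter_map, List.map_map]
  rfl

theorem pv_innerfold_keys (fv : List (String × Int × Int × Int × Int × Int))
    (names : List String) (taps : List Int) (d : PySem.Dict String (List Int))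
    (hk : d.keys = names) (hsub : ∀ x ∈ fv.map Prod.fst, x ∈ names) :
    ((fv.foldl (fun parity p => parity.modify p.1 [] (fun l => l ++ [pvInnerA p.2 taps])) d).keys) = names := by
  rw [PySem.Dict.keys_foldl_modify_key (key := Prod.fst), hk, pv_set_update_self _ _ hsub]

-- B's phase-1 fold: systematic and rows accumulate by appending
theorem pv_b_shift (ib : List Int) (n : Nat) (ks : List Nat) (reg sys : List Int)
    (rows : List (List Int)) :
    ks.foldl (pvStepB ib n) (reg, sys, rows)
      = ((ks.foldl (pvStepB ib n) (reg, [], [])).1,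
         sys ++ (ks.foldl (pvStepB ib n) (reg, [], [])).2.1,
         rows ++ (ks.foldl (pvStepB ib n) (reg, [], [])).2.2) := by
  induction ks generalizing reg sys rows with
  | nil => simp
  | cons k ks ih =>
    simp only [List.foldl_cons]
    rw [ih, ih (pvStepB ib n (reg, [], []) k).1]
    simp [pvStepB, List.append_assoc]

-- main loop correspondence
theorem pv_main (ib : List Int) (fv : List (String × Int × Int × Int × Int × Int))
    (hn : (fv.map Prod.fst).Nodup) (ks : List Nat) :
    ∀ (m1 m2 m3 m4 : Int) (sys : List Int) (d : PySem.Dict String (List Int)),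
    d.keys = fv.map Prod.fst →
    ((ks.map (fun k : Nat => (k : Int))).foldl (pvStepA ib (ib.length : Int) fv) ((m1, m2, m3, m4), sys, d)).2.1
        = sys ++ (ks.foldl (pvStepB ib ib.length) ([m1, m2, m3, m4], [], [])).2.1
    ∧ (ks.foldl (pvStepB ib ib.length) ([m1, m2, m3, m4], [], [])).1
        = [((ks.map (fun k : Nat => (k : Int))).foldl (pvStepA ib (ib.length : Int) fv) ((m1, m2, m3, m4), sys, d)).1.1,
           ((ks.map (fun k : Nat => (k : Int))).foldl (pvStepA ib (ib.length : Int) fv) ((m1, m2, m3, m4), sys, d)).1.2.1,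
           ((ks.map (fun k : Nat => (k : Int))).foldl (pvStepA ib (ib.length : Int) fv) ((m1, m2, m3, m4), sys, d)).1.2.2.1,
           ((ks.map (fun k : Nat => (k : Int))).foldl (pvStepA ib (ib.length : Int) fv) ((m1, m2, m3, m4), sys, d)).1.2.2.2]
    ∧ ((ks.map (fun k : Nat => (k : Int))).foldl (pvStepA ib (ib.length : Int) fv) ((m1, m2, m3, m4), sys, d)).2.2.keys
        = fv.map Prod.fst
    ∧ ∀ p ∈ fv,
      ((ks.map (fun k : Nat => (k : Int))).foldl (pvStepA ib (ib.length : Int) fv) ((m1, m2, m3, m4), sys, d)).2.2.getD p.1 []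
        = d.getD p.1 []
          ++ (ks.foldl (pvStepB ib ib.length) ([m1, m2, m3, m4], [], [])).2.2.map
              (fun row => pvXorTaps row (pvTapIdxs p.2)) := by
  induction ks with
  | nil =>
    intro m1 m2 m3 m4 sys d hk
    exact ⟨by simp, by simp, by simpa using hk, fun p _ => by simp⟩
  | cons k ks ih =>
    intro m1 m2 m3 m4 sys d hk
    have hsv : (if (k : Int) < (ib.length : Int) then PySem.List.pyGetD ib (k : Int) 0 else PySem.Int.bxor m3 m4)
        = (if k < ib.length then ib.getD k 0 else PySem.Int.bxor m3 m4) := by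
      by_cases hlt : k < ib.length
      · simp [hlt, PySem.List.pyGetD_natCast]
      · simp [hlt]
    set sv : Int := if k < ib.length then ib.getD k 0 else PySem.Int.bxor m3 m4 with hsvdef
    set r : Int := PySem.Int.bxor sv (PySem.Int.bxor m3 m4) with hrdef
    set d1 : PySem.Dict String (List Int) :=
      fv.foldl (fun parity p => parity.modify p.1 []
        (fun l => l ++ [pvInnerA p.2 [r, m1, m2, m3, m4]])) d with hd1def
    have hA : pvStepA ib (ib.length : Int) fv ((m1, m2, m3, m4), sys, d) (k : Int)
        = ((r, m1, m2, m3), sys ++ [sv], d1) := by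
      simp only [pvStepA, hsv]
      rfl
    have hB : pvStepB ib ib.length ([m1, m2, m3, m4], [], []) k
        = ([r, m1, m2, m3], [sv], [[r, m1, m2, m3, m4]]) := rfl
    have hk1 : d1.keys = fv.map Prod.fst :=
      pv_innerfold_keys fv (fv.map Prod.fst) [r, m1, m2, m3, m4] d hk (fun x hx => hx)
    obtain ⟨ih1, ih2, ih3, ih4⟩ := ih r m1 m2 m3 (sys ++ [sv]) d1 hk1
    simp only [List.map_cons, List.foldl_cons, hA, hB]
    rw [pv_b_shift ib ib.length ks [r, m1, m2, m3] [sv] [[r, m1, m2, m3, m4]]]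
    refine ⟨?_, ?_, ih3, ?_⟩
    · rw [ih1]; simp
    · simpa using ih2
    · intro p hp
      rw [ih4 p hp, hd1def, pv_innerfold_getD, pv_filter_singleton fv p hn hp]
      simp [pvInner_eq]

-- ===== VERDICT (by name: the statement is the Claim_ definition above) =====
theorem component_encode_py_spec : Claim_equal_component_encode_py := by
  intro ib fv _hdom hpre
  unfold Pre_component_encode_py at hpre
  unfold Spec_component_encode_py
  simp only [component_encode_py, component_encode_py_alt]
  have hrange : PySem.List.pyRange 0 ((ib.length : Int) + 4) 1
      = (List.range (ib.length + 4)).map (fun k : Nat => (k : Int)) := by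
    have h4 : ((ib.length : Int) + 4) = ((ib.length + 4 : Nat) : Int) := by push_cast; ring
    rw [h4, PySem.List.pyRange_zero_natCast]
  set parity0 : PySem.Dict String (List Int) :=
    fv.foldl (fun d p => d.insert p.1 ([] : List Int)) PySem.Dict.empty with hp0
  have hkeys0 : parity0.keys = fv.map Prod.fst := by
    rw [hp0, PySem.Dict.keys_foldl_insert_key (key := Prod.fst), PySem.Dict.keys_empty,
      PySem.Set.update_nil_left, PySem.Set.ofList_eq_self_of_nodup _ hpre]
  have hget0 : ∀ k, parity0.getD k [] = ([] : List Int) :=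
    pv_parity0_getD fv PySem.Dict.empty (fun k => PySem.Dict.getD_empty k []) 
  rw [hrange]
  obtain ⟨h1, h2, h3, h4⟩ := pv_main ib fv hpre (List.range (ib.length + 4)) 0 0 0 0 [] parity0 hkeys0
  rw [Prod.mk.injEq]
  constructor
  · simpa using h1
  · rw [PySem.Dict.items_eq_map_keys _ (h3 ▸ hpre) ([] : List Int), h3, List.map_map]
    refine List.map_congr_left (fun p hp => ?_)
    simp only [Function.comp]
    rw [h4 p hp, hget0]
    simp
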